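-- pv_equiv track=rewrite | github.com/AnukaMithara/Competitive-Programming | Mora Xtreme 8.0/Python/rainday.py | subtract_in_base
-- ===== SOURCE A (Python) =====
-- def subtract_in_base(a, b, base):
--     max_len = max(len(a), len(b))
--     a = a.zfill(max_len)
--     b = b.zfill(max_len)
--
--     result = ''
--     borrow = 0
--     for i in range(max_len-1, -1, -1):
--         total = int(a[i], base) - int(b[i], base) - borrow
--         if total < 0:
--             total += base
--             borrow = 1
--         else:
--             borrow = 0
--         result = str(total) + result
--
--     return result.lstrip('0') or '0'
-- ===== SOURCE B (Python) =====
-- def subtract_in_base(a, b, base):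
--     max_len = max(len(a), len(b))
--     na = 0
--     for c in a:
--         na = na * base + int(c, base)
--     nb = 0
--     for c in b:
--         nb = nb * base + int(c, base)
--     diff = (na - nb) % base ** max_len
--     digits = []
--     for _ in range(max_len):
--         diff, d = divmod(diff, base)
--         digits.append(str(d))
--     return ''.join(reversed(digits)).lstrip('0') or '0'
-- ===== Notes on version B (the rewrite author's own statement) =====
-- stated objective: alternative
-- what changed: A does schoolbook right-to-left digit subtraction with an explicit borrow flag, prepending each digit string; B converts both strings to integers by Horner evaluation, performs one modular subtraction (na-nb) % base**max_len (which reproduces the discarded final borrow), and extracts max_len digits by repeated divmod.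
-- outside the precondition, e.g. on subtract_in_base('5', '3', 0): A returns '2', B raises ZeroDivisionError
import Mathlib
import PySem

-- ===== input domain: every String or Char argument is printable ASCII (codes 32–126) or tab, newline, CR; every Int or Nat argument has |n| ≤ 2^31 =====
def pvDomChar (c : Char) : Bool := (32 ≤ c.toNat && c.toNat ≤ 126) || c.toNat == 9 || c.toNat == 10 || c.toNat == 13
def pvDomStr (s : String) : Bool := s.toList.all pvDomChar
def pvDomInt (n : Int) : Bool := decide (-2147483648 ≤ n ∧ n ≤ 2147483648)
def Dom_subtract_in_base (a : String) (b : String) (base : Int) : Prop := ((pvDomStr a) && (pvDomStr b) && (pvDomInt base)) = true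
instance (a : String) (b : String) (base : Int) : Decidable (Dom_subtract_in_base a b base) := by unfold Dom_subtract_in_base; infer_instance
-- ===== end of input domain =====

-- B replaces A's schoolbook borrow subtraction by one modular integer subtraction plus digit
-- extraction (alternative algorithm, similar cost); equivalence proved on Pre_ below.

-- ===== PORT A =====
-- digit value table of int(·, base): '0'-'9' (48-57), 'a'-'z' (97-122), 'A'-'Z' (65-90)
def pvDigitVal? (c : Char) : Option Int :=
  if 48 ≤ c.toNat ∧ c.toNat ≤ 57 then some ((c.toNat : Int) - 48)
  else if 97 ≤ c.toNat ∧ c.toNat ≤ 122 then some ((c.toNat : Int) - 87)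
  else if 65 ≤ c.toNat ∧ c.toNat ≤ 90 then some ((c.toNat : Int) - 55)
  else none

-- int(c, base) on a SINGLE char: exact for 2 ≤ base ≤ 36 and for base 0 (decimal digit literal);
-- other bases raise ValueError in Python (none here), and lie outside Pre_.
def pvIntChar? (c : Char) (base : Int) : Option Int :=
  if 2 ≤ base ∧ base ≤ 36 then
    match pvDigitVal? c with
    | some v => if v < base then some v else none
    | none => none
  else if base = 0 then
    (if 48 ≤ c.toNat ∧ c.toNat ≤ 57 then some ((c.toNat : Int) - 48) else none)
  else none

-- result.lstrip('0') or '0'  (lstrip with an explicit char set: dropWhile of '0' on the left; exact)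
def pvLstrip0OrZero (r : List Char) : String :=
  let r' := r.dropWhile (· == '0')
  if r' = [] then "0" else String.ofList r'

-- A's loop 'for i in range(max_len-1, -1, -1)' reads a[i], b[i] right to left; after zfill both
-- strings have length max_len, so the loop is exactly this structural recursion over the reversed
-- zipped char lists, threading (borrow, result); none = the ValueError Python raises in int().
def pvSubLoop (base : Int) : List (Char × Char) → Int → String → Option String
  | [], _, result => some result
  | (ca, cb) :: rest, borrow, result =>
    match pvIntChar? ca base, pvIntChar? cb base with
    | some va, some vb =>
      let total := va - vb - borrow
      if total < 0 then pvSubLoop base rest 1 (PySem.Int.toStr (total + base) ++ result)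
      else pvSubLoop base rest 0 (PySem.Int.toStr total ++ result)
    | _, _ => none

def subtract_in_base (a : String) (b : String) (base : Int) : String :=
  let maxLen := max a.toList.length b.toList.length
  -- a.zfill(max_len) / b.zfill(max_len): the operands never start with '+'/'-' when the digits
  -- parse (Pre_), so zfill is a plain left pad with '0'
  let a' := List.replicate (maxLen - a.toList.length) '0' ++ a.toList
  let b' := List.replicate (maxLen - b.toList.length) '0' ++ b.toList
  match pvSubLoop base (a'.reverse.zip b'.reverse) 0 "" with
  | some result => pvLstrip0OrZero result.toList
  | none => ""   -- Python raises ValueError here; outside Pre_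

-- ===== PORT B =====
-- 'for c in s: n = n*base + int(c, base)' (Horner evaluation; int(c, base) is the same primitive A uses)
def pvHornerParse? (base : Int) : List Char → Int → Option Int
  | [], n => some n
  | c :: cs, n =>
    match pvIntChar? c base with
    | some v => pvHornerParse? base cs (n * base + v)
    | none => none

-- 'for _ in range(max_len): diff, d = divmod(diff, base); digits.append(str(d))'
def pvExtract (base : Int) : Nat → Int → List String → Option (List String)
  | 0, _, digits => some digits
  | k+1, diff, digits =>
    match PySem.Int.divmod? diff base with
    | some (q, d) => pvExtract base k q (digits ++ [PySem.Int.toStr d])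
    | none => none   -- ZeroDivisionError (base = 0); outside Pre_

def subtract_in_base_alt (a : String) (b : String) (base : Int) : String :=
  let maxLen := max a.toList.length b.toList.length
  match pvHornerParse? base a.toList 0, pvHornerParse? base b.toList 0 with
  | some na, some nb =>
    match PySem.Int.mod? (na - nb) (base ^ maxLen) with
    | some diff =>
      match pvExtract base maxLen diff [] with
      | some digits => pvLstrip0OrZero (String.join digits.reverse).toList
      | none => ""
    | none => ""   -- ZeroDivisionError; outside Pre_
  | _, _ => ""     -- ValueError; outside Pre_

-- ===== PRECONDITION & SPEC =====
def pvOk (base : Int) (c : Char) : Bool :=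
  match pvDigitVal? c with
  | some v => v < base
  | none => false

-- Pre_ = the real bases 2..36 with every char a digit below the base (plus the degenerate
-- empty-empty input, answered '0' for any base): exactly where A returns, except one corner where
-- A also returns: base 0 on decimal-digit strings, where A's borrow loop wraps by 0 while B's
-- single '(na-nb) % base**max_len' raises ZeroDivisionError.
def Pre_subtract_in_base (a : String) (b : String) (base : Int) : Prop :=
  (2 ≤ base ∧ base ≤ 36 ∧ ((a.toList ++ b.toList).all (pvOk base)) = true) ∨
    (a.toList = [] ∧ b.toList = [])

instance (a : String) (b : String) (base : Int) : Decidable (Pre_subtract_in_base a b base) := by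
  unfold Pre_subtract_in_base; infer_instance

def pvWitness_subtract_in_base : String × String × Int := ("10", "1", 2)

def Spec_subtract_in_base (a : String) (b : String) (base : Int) (out : String) : Prop :=
  out = subtract_in_base_alt a b base
instance (a : String) (b : String) (base : Int) (out : String) : Decidable (Spec_subtract_in_base a b base out) := by
  unfold Spec_subtract_in_base; infer_instance

-- ===== CLAIM (what is proved, stated in full; the proofs are below) =====
def Claim_equal_subtract_in_base : Prop := ∀ (a : String) (b : String) (base : Int), Dom_subtract_in_base a b base → Pre_subtract_in_base a b base → Spec_subtract_in_base a b base (subtract_in_base a b base)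

-- ===== LEMMAS AND PROOFS =====

-- digit value of a char that passed pvOk
def pvDV (c : Char) : Int := (pvDigitVal? c).getD 0

-- value of an LSB-first digit list
def pvVal (base : Int) : List Int → Int
  | [] => 0
  | x :: xs => x + base * pvVal base xs

-- MSB-first Horner accumulation (the shape of pvHornerParse?'s accumulator)
def pvHorner (base : Int) : Int → List Int → Int
  | n, [] => n
  | n, v :: vs => pvHorner base (n * base + v) vs

-- A's digit recurrence on LSB-first value pairs
def pvDRec (base : Int) : List (Int × Int) → Int → List Int
  | [], _ => []
  | (x, y) :: rest, bor =>
    let t := x - y - bor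
    if t < 0 then (t + base) :: pvDRec base rest 1 else t :: pvDRec base rest 0

-- B's digit extraction in emod/ediv form
def pvDigitsE (base : Int) : Nat → Int → List Int
  | 0, _ => []
  | k+1, d => d % base :: pvDigitsE base k (d / base)

-- MSB-first concatenation of str(d): str(d_last) ++ … ++ str(d_first) for an LSB-first list
def pvStrOf : List Int → String
  | [] => ""
  | d :: ds => pvStrOf ds ++ PySem.Int.toStr d

lemma pvDV_ok {base : Int} {c : Char} (hb : 2 ≤ base ∧ base ≤ 36) (h : pvOk base c = true) :
    pvIntChar? c base = some (pvDV c) ∧ 0 ≤ pvDV c ∧ pvDV c < base := by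
  unfold pvOk at h
  unfold pvDV pvIntChar?
  rw [if_pos hb]
  cases hd : pvDigitVal? c with
  | none => rw [hd] at h; simp at h
  | some v =>
    rw [hd] at h
    simp only [decide_eq_true_eq] at h
    have hv : 0 ≤ v := by
      unfold pvDigitVal? at hd
      split_ifs at hd <;> simp_all <;> omega
    simp [h, hv]

lemma pvSubLoop_eq {base : Int} (hb : 2 ≤ base ∧ base ≤ 36) :
    ∀ (ps : List (Char × Char)) (bor : Int) (res : String),
      (∀ p ∈ ps, pvOk base p.1 = true ∧ pvOk base p.2 = true) →
      pvSubLoop base ps bor res =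
        some (pvStrOf (pvDRec base (ps.map (Prod.map pvDV pvDV)) bor) ++ res) := by
  intro ps
  induction ps with
  | nil => intro bor res _; simp [pvSubLoop, pvDRec, pvStrOf]
  | cons p rest ih =>
    intro bor res h
    obtain ⟨ca, cb⟩ := p
    obtain ⟨hca, hcb⟩ := h _ (List.mem_cons_self ..)
    obtain ⟨h1, _, _⟩ := pvDV_ok hb hca
    obtain ⟨h2, _, _⟩ := pvDV_ok hb hcb
    have hrest : ∀ p ∈ rest, pvOk base p.1 = true ∧ pvOk base p.2 = true :=
      fun p hp => h p (List.mem_cons_of_mem _ hp)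
    simp only [pvSubLoop, h1, h2, List.map_cons, Prod.map, pvDRec]
    by_cases ht : pvDV ca - pvDV cb - bor < 0
    · rw [if_pos ht, if_pos ht, ih 1 _ hrest]
      simp [pvStrOf, String.append_assoc]
    · rw [if_neg ht, if_neg ht, ih 0 _ hrest]
      simp [pvStrOf, String.append_assoc]

lemma pvHornerParse_eq {base : Int} (hb : 2 ≤ base ∧ base ≤ 36) :
    ∀ (cs : List Char) (n : Int), (∀ c ∈ cs, pvOk base c = true) →
      pvHornerParse? base cs n = some (pvHorner base n (cs.map pvDV)) := by
  intro cs
  induction cs with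
  | nil => intro n _; simp [pvHornerParse?, pvHorner]
  | cons c cs ih =>
    intro n h
    obtain ⟨h1, _, _⟩ := pvDV_ok hb (h _ (List.mem_cons_self ..))
    simp only [pvHornerParse?, h1, List.map_cons, pvHorner]
    exact ih _ (fun c hc => h c (List.mem_cons_of_mem _ hc))

lemma pvVal_append (base : Int) : ∀ (l m : List Int),
    pvVal base (l ++ m) = pvVal base l + base ^ l.length * pvVal base m := by
  intro l m
  induction l with
  | nil => simp [pvVal]
  | cons x xs ih => simp [pvVal, ih, pow_succ]; ring

lemma pvVal_replicate_zero (base : Int) (k : Nat) : pvVal base (List.replicate k 0) = 0 := by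
  induction k with
  | zero => simp [pvVal]
  | succ k ih => simp [List.replicate_succ, pvVal, ih]

lemma pvHorner_eq_val (base : Int) : ∀ (vs : List Int) (n : Int),
    pvHorner base n vs = n * base ^ vs.length + pvVal base vs.reverse := by
  intro vs
  induction vs with
  | nil => intro n; simp [pvHorner, pvVal]
  | cons v vs ih =>
    intro n
    simp only [pvHorner, List.reverse_cons, List.length_cons, ih, pvVal_append,
      List.length_reverse, pvVal, pow_succ]
    ring

lemma pvEmod_mul_ediv (a b M : Int) (hb : 0 < b) :
    a % (b * M) / b = a / b % M := by
  have h1 : a % (b * M) = a + b * (-(M * (a / (b * M)))) := by rw [Int.emod_def]; ring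
  rw [h1, Int.add_mul_ediv_left _ _ (ne_of_gt hb),
    (Int.ediv_ediv_of_nonneg (le_of_lt hb) : a / b / M = a / (b * M)).symm, Int.emod_def]
  ring

lemma pvDRec_eq {base : Int} (hb : 2 ≤ base) :
    ∀ (xs ys : List Int) (bor : Int), xs.length = ys.length →
      (∀ x ∈ xs, 0 ≤ x ∧ x < base) → (∀ y ∈ ys, 0 ≤ y ∧ y < base) → (bor = 0 ∨ bor = 1) →
      pvDRec base (xs.zip ys) bor =
        pvDigitsE base xs.length ((pvVal base xs - pvVal base ys - bor) % base ^ xs.length) := by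
  intro xs
  induction xs with
  | nil =>
    intro ys bor hlen _ _ _
    simp [pvDRec, pvDigitsE]
  | cons x xs ih =>
    intro ys bor hlen hx hy hbor
    cases ys with
    | nil => simp at hlen
    | cons y ys =>
      have hlen' : xs.length = ys.length := by simpa using hlen
      obtain ⟨hx0, hx1⟩ := hx x (List.mem_cons_self ..)
      obtain ⟨hy0, hy1⟩ := hy y (List.mem_cons_self ..)
      have hx' : ∀ v ∈ xs, 0 ≤ v ∧ v < base := fun v hv => hx v (List.mem_cons_of_mem _ hv)
      have hy' : ∀ v ∈ ys, 0 ≤ v ∧ v < base := fun v hv => hy v (List.mem_cons_of_mem _ hv)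
      have hbpos : (0 : Int) < base := by omega
      have hbne : base ≠ 0 := by omega
      set t : Int := x - y - bor with hT
      set VX : Int := pvVal base xs with hVX
      set VY : Int := pvVal base ys with hVY
      set k : Nat := xs.length with hk
      have ht_lo : -base ≤ t := by omega
      have ht_hi : t < base := by omega
      have hhead : (t + base * (VX - VY)) % base ^ (k + 1) % base =
          if t < 0 then t + base else t := by
        rw [Int.emod_emod_of_dvd _ (dvd_pow_self base (Nat.succ_ne_zero k)),
          Int.add_mul_emod_self_left]
        by_cases ht : t < 0
        · rw [if_pos ht]
          conv_lhs => rw [show t = (t + base) + base * (-1) by ring]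
          rw [Int.add_mul_emod_self_left, Int.emod_eq_of_lt (by omega) (by omega)]
        · rw [if_neg ht, Int.emod_eq_of_lt (by omega) ht_hi]
      have htdiv : t / base = if t < 0 then -1 else 0 := by
        by_cases ht : t < 0
        · rw [if_pos ht]
          conv_lhs => rw [show t = (t + base) + base * (-1) by ring]
          rw [Int.add_mul_ediv_left _ _ hbne, Int.ediv_eq_zero_of_lt (by omega) (by omega)]
          ring
        · rw [if_neg ht, Int.ediv_eq_zero_of_lt (by omega) ht_hi]
      have hdiv : (t + base * (VX - VY)) % base ^ (k + 1) / base =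
          (VX - VY - (if t < 0 then 1 else 0)) % base ^ k := by
        rw [show base ^ (k + 1) = base * base ^ k by rw [pow_succ]; ring,
          pvEmod_mul_ediv _ base (base ^ k) hbpos,
          Int.add_mul_ediv_left _ _ hbne, htdiv]
        congr 1
        by_cases ht : t < 0
        · simp [ht]
          try ring
        · simp [ht]
          try ring
      have hN : x + base * VX - (y + base * VY) - bor = t + base * (VX - VY) := by
        rw [hT]; ring
      simp only [List.zip_cons_cons, pvDRec, List.length_cons, pvVal, pvDigitsE]
      rw [← hVX, ← hVY, ← hk, hN, ← hT, hhead, hdiv]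
      by_cases ht : t < 0
      · rw [if_pos ht, if_pos ht, if_pos ht, ih ys 1 hlen' hx' hy' (Or.inr rfl), ← hVY]
      · rw [if_neg ht, if_neg ht, if_neg ht, ih ys 0 hlen' hx' hy' (Or.inl rfl), ← hVY]

lemma pvExtract_eq {base : Int} (hb : 0 < base) :
    ∀ (n : Nat) (d : Int) (acc : List String),
      pvExtract base n d acc = some (acc ++ (pvDigitsE base n d).map PySem.Int.toStr) := by
  intro n
  induction n with
  | zero => intro d acc; simp [pvExtract, pvDigitsE]
  | succ k ih =>
    intro d acc
    simp only [pvExtract, PySem.Int.divmod?, if_neg (show ¬ base = 0 by omega)]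
    rw [ih, Int.fdiv_eq_ediv_of_nonneg _ (le_of_lt hb), Int.fmod_eq_emod,
      if_pos (Or.inl (le_of_lt hb)), add_zero]
    simp [pvDigitsE]

lemma pvJoin_singleton (l : List String) (s : String) :
    String.join (l ++ [s]) = String.join l ++ s := by
  simp [String.join, List.foldl_append]

lemma pvJoin_rev_map (ds : List Int) :
    String.join ((ds.map PySem.Int.toStr).reverse) = pvStrOf ds := by
  induction ds with
  | nil => simp [pvStrOf, String.join]
  | cons d ds ih => simp [List.reverse_cons, pvJoin_singleton, ih, pvStrOf]

-- ===== VERDICT (by name: the statement is the Claim_ definition above) =====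
theorem subtract_in_base_spec : Claim_equal_subtract_in_base := by
  intro a b base hdom hpre
  rcases hpre with ⟨hb2, hb36, hall⟩ | ⟨hea, heb⟩
  case inr =>
    -- both strings empty: A's loop body never runs and B extracts no digits; both return "0"
    simp only [Spec_subtract_in_base, subtract_in_base, subtract_in_base_alt, hea, heb]
    norm_num [pvSubLoop, pvHornerParse?, pvExtract, pvLstrip0OrZero, PySem.Int.mod?,
      Int.zero_fmod, String.join]
  have hb : 2 ≤ base ∧ base ≤ 36 := ⟨hb2, hb36⟩
  have hbpos : (0 : Int) < base := by omega
  simp only [List.all_append, Bool.and_eq_true, List.all_eq_true] at hall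
  obtain ⟨hA, hB⟩ := hall
  simp only [Spec_subtract_in_base, subtract_in_base, subtract_in_base_alt]
  set la := a.toList with hla
  set lb := b.toList with hlb
  set n := max la.length lb.length with hn
  have hlaLe : la.length ≤ n := le_max_left _ _
  have hlbLe : lb.length ≤ n := le_max_right _ _
  have hok0 : pvOk base '0' = true := by
    have h48 : ('0' : Char).toNat = 48 := rfl
    simp [pvOk, pvDigitVal?, h48]
    omega
  have hokA : ∀ c ∈ (List.replicate (n - la.length) '0' ++ la), pvOk base c = true := by
    intro c hc
    rcases List.mem_append.mp hc with h | h
    · rw [List.eq_of_mem_replicate h]; exact hok0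
    · exact hA c h
  have hokB : ∀ c ∈ (List.replicate (n - lb.length) '0' ++ lb), pvOk base c = true := by
    intro c hc
    rcases List.mem_append.mp hc with h | h
    · rw [List.eq_of_mem_replicate h]; exact hok0
    · exact hB c h
  have hloop := pvSubLoop_eq hb
    ((List.replicate (n - la.length) '0' ++ la).reverse.zip
      ((List.replicate (n - lb.length) '0' ++ lb).reverse)) 0 ""
    (by
      intro p hp
      obtain ⟨p1, p2⟩ := p
      obtain ⟨h1, h2⟩ := List.of_mem_zip hp
      exact ⟨hokA _ (List.mem_reverse.mp h1), hokB _ (List.mem_reverse.mp h2)⟩)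
  simp only [hloop, pvHornerParse_eq hb la 0 hA, pvHornerParse_eq hb lb 0 hB]
  set VA : Int := pvVal base (la.reverse.map pvDV) with hVA
  set VB : Int := pvVal base (lb.reverse.map pvDV) with hVB
  have hnaA : pvHorner base 0 (la.map pvDV) = VA := by
    rw [pvHorner_eq_val, ← List.map_reverse]; simp [hVA]
  have hnaB : pvHorner base 0 (lb.map pvDV) = VB := by
    rw [pvHorner_eq_val, ← List.map_reverse]; simp [hVB]
  have hpow : (0 : Int) < base ^ n := pow_pos hbpos n
  have hmod : PySem.Int.mod? (VA - VB) (base ^ n) = some ((VA - VB) % base ^ n) := by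
    simp only [PySem.Int.mod?]
    rw [if_neg (ne_of_gt hpow), Int.fmod_eq_emod, if_pos (Or.inl (le_of_lt hpow)), add_zero]
  simp only [hnaA, hnaB, hmod, pvExtract_eq hbpos, List.nil_append, pvJoin_rev_map,
    String.append_empty]
  rw [← List.zip_map]
  set xs := (List.replicate (n - la.length) '0' ++ la).reverse.map pvDV with hxs
  set ys := (List.replicate (n - lb.length) '0' ++ lb).reverse.map pvDV with hys
  have hxlen : xs.length = n := by simp [hxs]; omega
  have hylen : ys.length = n := by simp [hys]; omega
  have hxv : pvVal base xs = VA := by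
    rw [hxs, List.reverse_append, List.reverse_replicate, List.map_append, List.map_replicate,
      show pvDV '0' = 0 from rfl, pvVal_append, pvVal_replicate_zero, hVA]
    ring
  have hyv : pvVal base ys = VB := by
    rw [hys, List.reverse_append, List.reverse_replicate, List.map_append, List.map_replicate,
      show pvDV '0' = 0 from rfl, pvVal_append, pvVal_replicate_zero, hVB]
    ring
  have hxb : ∀ x ∈ xs, 0 ≤ x ∧ x < base := by
    intro x hx
    rw [hxs] at hx
    obtain ⟨c, hc, rfl⟩ := List.mem_map.mp hx
    obtain ⟨-, h0, h1⟩ := pvDV_ok hb (hokA _ (List.mem_reverse.mp hc))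
    exact ⟨h0, h1⟩
  have hyb : ∀ y ∈ ys, 0 ≤ y ∧ y < base := by
    intro y hy
    rw [hys] at hy
    obtain ⟨c, hc, rfl⟩ := List.mem_map.mp hy
    obtain ⟨-, h0, h1⟩ := pvDV_ok hb (hokB _ (List.mem_reverse.mp hc))
    exact ⟨h0, h1⟩
  rw [pvDRec_eq hb2 xs ys 0 (by rw [hxlen, hylen]) hxb hyb (Or.inl rfl), hxlen, hxv, hyv, sub_zero]
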